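-- pv_equiv track=rewrite | github.com/AleBastos25/Enter | src/memory/pattern_registry.py | _extract_shape
-- ===== SOURCE A (Python) =====
-- def _extract_shape(value: str) -> str:
--     """Extract shape sequence from value.
--
--     Args:
--         value: Value string.
--
--     Returns:
--         Shape sequence (e.g., "D{5}" for 5 digits).
--     """
--     shape = []
--     i = 0
--     while i < len(value):
--         if value[i].isdigit():
--             digit_count = 0
--             while i < len(value) and value[i].isdigit():
--                 digit_count += 1
--                 i += 1
--             shape.append(f"D{{{digit_count}}}")
--         elif value[i].isalpha():
--             letter_count = 0
--             while i < len(value) and value[i].isalpha():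
--                 letter_count += 1
--                 i += 1
--             shape.append(f"L{{{letter_count}}}")
--         else:
--             shape.append("P")  # Punctuation
--             i += 1
--
--     return "".join(shape)
-- ===== SOURCE B (Python) =====
-- def _extract_shape(value: str) -> str:
--     # Stage 1: class mask ('D'/'L'/'P' per character).
--     mask = ''.join('D' if c.isdigit() else 'L' if c.isalpha() else 'P' for c in value)
--     n = len(mask)
--     # Stage 2: all run-boundary indices (start of string, end, and every class change).
--     cuts = [i for i in range(n + 1) if i == 0 or i == n or mask[i] != mask[i - 1]]
--     # Stage 3: one piece per boundary pair; run length by index subtraction.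
--     pieces = []
--     for a, b in zip(cuts, cuts[1:]):
--         k = mask[a]
--         pieces.append('P' * (b - a) if k == 'P' else f"{k}{{{b - a}}}")
--     return ''.join(pieces)
-- ===== Notes on version B (the rewrite author's own statement) =====
-- stated objective: alternative
-- what changed: Replaced A's index-driven while loop with nested per-class counting loops by three staged passes: build a class mask string, compute the list of run-boundary indices with a range filter, then emit each piece from consecutive boundary pairs with the run length obtained by index subtraction (no sequential counters).
import Mathlib
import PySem

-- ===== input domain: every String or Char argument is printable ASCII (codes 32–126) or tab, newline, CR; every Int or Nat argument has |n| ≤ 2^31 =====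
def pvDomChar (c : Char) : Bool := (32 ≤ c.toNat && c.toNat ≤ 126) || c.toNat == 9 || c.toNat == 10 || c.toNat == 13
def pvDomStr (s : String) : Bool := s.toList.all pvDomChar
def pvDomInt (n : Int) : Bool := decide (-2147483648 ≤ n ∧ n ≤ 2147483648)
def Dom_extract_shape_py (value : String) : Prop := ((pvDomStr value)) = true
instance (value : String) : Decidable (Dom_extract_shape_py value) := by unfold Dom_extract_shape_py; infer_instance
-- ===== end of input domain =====

-- B replaces A's index-driven counting while-loop by three staged passes (class mask,
-- run-boundary indices via a range filter, pieces by index subtraction); objective: alternative, same cost.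

-- shared formatting helper: f"D{{{n}}}" / f"L{{{n}}}"
def pvPiece (k : Char) (n : Nat) : List Char := k :: '{' :: (Nat.repr n).toList ++ ['}']

-- ===== PORT A =====
-- inner `while i < len(value) and value[i].is…(): count += 1; i += 1` loop:
-- pvCount is the count it accumulates, pvAdv the position it leaves i at (as the remaining suffix)
def pvCount (p : Char → Bool) : List Char → Nat
  | [] => 0
  | c :: l => if p c then pvCount p l + 1 else 0

def pvAdv (p : Char → Bool) : List Char → List Char
  | [] => []
  | c :: l => if p c then pvAdv p l else c :: l

theorem pvAdv_length_le (p : Char → Bool) (l : List Char) : (pvAdv p l).length ≤ l.length := by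
  induction l with
  | nil => simp [pvAdv]
  | cons c l ih => by_cases h : p c <;> simp [pvAdv, h] <;> omega

-- the outer `while i < len(value)` loop, on the suffix of value starting at i
def pvGoA : List Char → List (List Char)
  | [] => []
  | c :: rest =>
    if PySem.Chars.isdigit c then
      pvPiece 'D' (pvCount PySem.Chars.isdigit (c :: rest)) ::
        pvGoA (pvAdv PySem.Chars.isdigit (c :: rest))
    else if PySem.Chars.isalpha c then
      pvPiece 'L' (pvCount PySem.Chars.isalpha (c :: rest)) ::
        pvGoA (pvAdv PySem.Chars.isalpha (c :: rest))
    else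
      ['P'] :: pvGoA rest
termination_by l => l.length
decreasing_by
  · simp only [pvAdv, *, if_true]
    exact Nat.lt_succ_of_le (pvAdv_length_le _ _)
  · simp only [pvAdv, *, if_true]
    exact Nat.lt_succ_of_le (pvAdv_length_le _ _)
  · simp

def extract_shape_py (value : String) : String :=
  String.mk (PySem.Chars.join [] (pvGoA value.toList))

-- ===== PORT B =====
-- 'D' if c.isdigit() else 'L' if c.isalpha() else 'P'
def pvClassify (c : Char) : Char :=
  if PySem.Chars.isdigit c then 'D' else if PySem.Chars.isalpha c then 'L' else 'P'

-- Stage 1: mask = ''.join(classify(c) for c in value)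
def pvMask (l : List Char) : List Char := l.map pvClassify

-- Stage 2: cuts = [i for i in range(n+1) if i == 0 or i == n or mask[i] != mask[i-1]]
-- (mask[i], mask[i-1] are only reached with 1 ≤ i ≤ n-1, so getD's default is never used: exact)
def pvCuts (m : List Char) : List Nat :=
  (List.range (m.length + 1)).filter
    (fun i => i == 0 || i == m.length || !(m.getD i 'P' == m.getD (i - 1) 'P'))

-- Stage 3: 'P' * (b-a) if mask[a] == 'P' else f"{mask[a]}{{{b-a}}}"
def pvPieceB (m : List Char) : Nat × Nat → List Char
  | (a, b) => if m.getD a 'P' = 'P' then List.replicate (b - a) 'P' else pvPiece (m.getD a 'P') (b - a)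

def extract_shape_py_alt (value : String) : String :=
  let m := pvMask value.toList
  let cuts := pvCuts m
  String.mk (PySem.Chars.join [] ((cuts.zip cuts.tail).map (pvPieceB m)))

-- ===== PRECONDITION & SPEC =====
def Spec_extract_shape_py (value : String) (out : String) : Prop := out = extract_shape_py_alt value
instance (value : String) (out : String) : Decidable (Spec_extract_shape_py value out) := by unfold Spec_extract_shape_py; infer_instance

-- ===== CLAIM =====
def Claim_equal_extract_shape_py : Prop := ∀ (value : String), Dom_extract_shape_py value → Spec_extract_shape_py value (extract_shape_py value)

-- ===== LEMMAS AND PROOFS =====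

theorem join_nil_eq_flatten (parts : List (List Char)) :
    PySem.Chars.join [] parts = parts.flatten := by
  induction parts with
  | nil => rfl
  | cons h t ih => cases t <;> simp_all [List.intercalate, List.intersperse, PySem.Chars.join]

theorem digit_not_alpha (c : Char) (h : PySem.Chars.isdigit c = true) :
    PySem.Chars.isalpha c = false := by
  simp only [PySem.Chars.isdigit, PySem.Chars.isalpha, PySem.Chars.isupper, PySem.Chars.islower,
    decide_eq_true_eq, Bool.and_eq_true, Bool.or_eq_false_iff, Bool.and_eq_false_iff,
    decide_eq_false_iff_not, Char.le_def, UInt32.le_iff_toNat_le] at *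
  have h0 : ('0':Char).val.toNat = 48 := rfl
  have h9 : ('9':Char).val.toNat = 57 := rfl
  have hA : ('A':Char).val.toNat = 65 := rfl
  have hZ : ('Z':Char).val.toNat = 90 := rfl
  have ha : ('a':Char).val.toNat = 97 := rfl
  have hz : ('z':Char).val.toNat = 122 := rfl
  omega

theorem classify_eq_D (x : Char) :
    (pvClassify x == 'D') = PySem.Chars.isdigit x := by
  unfold pvClassify
  split_ifs with h1 h2 <;> simp_all

theorem classify_eq_L (x : Char) :
    (pvClassify x == 'L') = PySem.Chars.isalpha x := by
  unfold pvClassify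
  by_cases h1 : PySem.Chars.isdigit x
  · simp [h1, digit_not_alpha x h1]
  · by_cases h2 : PySem.Chars.isalpha x <;> simp [h1, h2]

theorem pvCount_eq (p : Char → Bool) (l : List Char) :
    pvCount p l = (l.takeWhile p).length := by
  induction l with
  | nil => rfl
  | cons c l ih => by_cases h : p c <;> simp [pvCount, List.takeWhile, h, ih]

theorem pvAdv_eq (p : Char → Bool) (l : List Char) :
    pvAdv p l = l.dropWhile p := by
  induction l with
  | nil => rfl
  | cons c l ih => by_cases h : p c <;> simp [pvAdv, List.dropWhile, h, ih]

-- proof-side run-length view of the input (groups of equal pvClassify)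
def pvRuns : List Char → List (Char × Nat)
  | [] => []
  | c :: rest =>
    match pvRuns rest with
    | (k, n) :: more =>
      if pvClassify c = k then (k, n + 1) :: more else (pvClassify c, 1) :: (k, n) :: more
    | [] => [(pvClassify c, 1)]

def pvRunPiece : Char × Nat → List Char
  | (k, n) => if k = 'P' then List.replicate n 'P' else pvPiece k n

theorem pvRuns_cons (c : Char) (rest : List Char) :
    pvRuns (c :: rest) =
      (pvClassify c, (rest.takeWhile (fun x => pvClassify x == pvClassify c)).length + 1)
        :: pvRuns (rest.dropWhile (fun x => pvClassify x == pvClassify c)) := by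
  induction rest generalizing c with
  | nil => rfl
  | cons d rest' ih =>
    by_cases h : pvClassify d = pvClassify c
    · show (match pvRuns (d :: rest') with
        | (k, n) :: more =>
          if pvClassify c = k then (k, n + 1) :: more else (pvClassify c, 1) :: (k, n) :: more
        | [] => [(pvClassify c, 1)]) = _
      rw [ih d]
      simp [List.takeWhile, List.dropWhile, h]
    · show (match pvRuns (d :: rest') with
        | (k, n) :: more =>
          if pvClassify c = k then (k, n + 1) :: more else (pvClassify c, 1) :: (k, n) :: more
        | [] => [(pvClassify c, 1)]) = _
      have hb : (pvClassify d == pvClassify c) = false := by simp [h]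
      have h' : ¬ pvClassify c = pvClassify d := fun e => h e.symm
      simp only [List.takeWhile, List.dropWhile, hb]
      rw [ih d]
      simp [h']

-- the runs-based flattened output (bridge between A and B)
def pvBflat (l : List Char) : List Char := ((pvRuns l).map pvRunPiece).flatten

theorem pvBflat_P (c : Char) (rest : List Char) (h : pvClassify c = 'P') :
    pvBflat (c :: rest) = 'P' :: pvBflat rest := by
  cases rest with
  | nil => simp [pvBflat, pvRuns, pvRunPiece, h]
  | cons d rest' =>
    by_cases hd : pvClassify d = 'P'
    · unfold pvBflat
      rw [pvRuns_cons c (d :: rest'), pvRuns_cons d rest']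
      simp [List.takeWhile, List.dropWhile, h, hd, pvRunPiece, List.replicate]
    · unfold pvBflat
      rw [pvRuns_cons c (d :: rest')]
      have hdc : (pvClassify d == 'P') = false := by simp [hd]
      simp [List.takeWhile, List.dropWhile, h, hdc, pvRunPiece]

theorem pvMain : ∀ (n : Nat) (l : List Char), l.length ≤ n →
    (pvGoA l).flatten = pvBflat l := by
  intro n
  induction n with
  | zero =>
    intro l hl
    have : l = [] := List.eq_nil_of_length_eq_zero (Nat.le_zero.mp hl)
    subst this; simp [pvGoA, pvBflat, pvRuns]
  | succ n ih =>
    intro l hl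
    cases l with
    | nil => simp [pvGoA, pvBflat, pvRuns]
    | cons c rest =>
      by_cases hd : PySem.Chars.isdigit c
      · rw [pvGoA, if_pos hd]
        simp only [List.flatten_cons]
        rw [pvCount_eq, pvAdv_eq]
        have hpred : (fun x => pvClassify x == pvClassify c) = PySem.Chars.isdigit := by
          funext x
          have : pvClassify c = 'D' := by simp [pvClassify, hd]
          rw [this, classify_eq_D]
        have hdrop : (rest.dropWhile PySem.Chars.isdigit).length ≤ n := by
          have := List.length_dropWhile_le PySem.Chars.isdigit rest
          simp at hl; omega
        rw [pvBflat, pvRuns_cons, hpred]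
        have hcls : pvClassify c = 'D' := by simp [pvClassify, hd]
        simp only [List.map_cons, List.flatten_cons, hcls]
        rw [show List.dropWhile PySem.Chars.isdigit (c :: rest)
              = List.dropWhile PySem.Chars.isdigit rest by simp [List.dropWhile, hd],
            show List.takeWhile PySem.Chars.isdigit (c :: rest)
              = c :: List.takeWhile PySem.Chars.isdigit rest by simp [List.takeWhile, hd]]
        rw [ih _ hdrop]
        simp [pvRunPiece, pvPiece, pvBflat]
      · by_cases ha : PySem.Chars.isalpha c
        · rw [pvGoA, if_neg hd, if_pos ha]
          simp only [List.flatten_cons]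
          rw [pvCount_eq, pvAdv_eq]
          have hpred : (fun x => pvClassify x == pvClassify c) = PySem.Chars.isalpha := by
            funext x
            have : pvClassify c = 'L' := by simp [pvClassify, hd, ha]
            rw [this, classify_eq_L]
          have hdrop : (rest.dropWhile PySem.Chars.isalpha).length ≤ n := by
            have := List.length_dropWhile_le PySem.Chars.isalpha rest
            simp at hl; omega
          rw [pvBflat, pvRuns_cons, hpred]
          have hcls : pvClassify c = 'L' := by simp [pvClassify, hd, ha]
          simp only [List.map_cons, List.flatten_cons, hcls]
          rw [show List.dropWhile PySem.Chars.isalpha (c :: rest)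
                = List.dropWhile PySem.Chars.isalpha rest by simp [List.dropWhile, ha],
              show List.takeWhile PySem.Chars.isalpha (c :: rest)
                = c :: List.takeWhile PySem.Chars.isalpha rest by simp [List.takeWhile, ha]]
          rw [ih _ hdrop]
          simp [pvRunPiece, pvPiece, pvBflat]
        · have hcls : pvClassify c = 'P' := by simp [pvClassify, hd, ha]
          rw [pvGoA, if_neg hd, if_neg ha]
          simp only [List.flatten_cons]
          rw [pvBflat_P c rest hcls]
          have : rest.length ≤ n := by simp at hl; omega
          rw [ih _ this]
          rfl

-- pvCuts of a run followed by the remainder: 0, then the remainder's cuts shifted by k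
theorem pvCuts_decomp (k : Nat) (c : Char) (m' : List Char) (hk : 1 ≤ k)
    (hne : ∀ d, m'.head? = some d → d ≠ c) :
    pvCuts (List.replicate k c ++ m') = 0 :: (pvCuts m').map (k + ·) := by
  unfold pvCuts
  simp only [List.getD_eq_getElem?_getD]
  have hlen : (List.replicate k c ++ m').length = k + m'.length := by simp
  rw [hlen]
  have hrange : List.range (k + m'.length + 1)
      = List.range k ++ (List.range (m'.length + 1)).map (k + ·) := by
    rw [Nat.add_assoc]; exact List.range_add ..
  rw [hrange, List.filter_append, List.filter_map]
  have h1 : (List.range k).filter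
      (fun i => i == 0 || i == k + m'.length
        || !((List.replicate k c ++ m')[i]?.getD 'P' == (List.replicate k c ++ m')[i - 1]?.getD 'P')) = [0] := by
    obtain ⟨k', rfl⟩ : ∃ k', k = k' + 1 := ⟨k - 1, by omega⟩
    rw [List.range_succ_eq_map, List.filter_cons]
    have hnil : ((List.range k').map Nat.succ).filter
        (fun i => i == 0 || i == k' + 1 + m'.length
          || !((List.replicate (k' + 1) c ++ m')[i]?.getD 'P' == (List.replicate (k' + 1) c ++ m')[i - 1]?.getD 'P')) = [] := by
      rw [List.filter_eq_nil_iff]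
      intro a ha
      obtain ⟨i, hi, rfl⟩ := List.mem_map.mp ha
      have hi' : i < k' := List.mem_range.mp hi
      have e1 : (List.replicate (k' + 1) c ++ m')[Nat.succ i]? = some c := by
        rw [List.getElem?_append_left (by simp <;> omega), List.getElem?_replicate]
        simp <;> omega
      have e2 : (List.replicate (k' + 1) c ++ m')[Nat.succ i - 1]? = some c := by
        rw [List.getElem?_append_left (by simp <;> omega), List.getElem?_replicate]
        simp <;> omega
      simp only [e1, e2, Option.getD_some, beq_self_eq_true, Bool.not_true, Bool.or_false]
      simp <;> omega
    rw [hnil]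
    simp
  rw [h1]
  have h2 : ∀ j ∈ List.range (m'.length + 1),
      ((fun i => i == 0 || i == k + m'.length
        || !((List.replicate k c ++ m')[i]?.getD 'P' == (List.replicate k c ++ m')[i - 1]?.getD 'P')) ∘ (k + ·)) j
      = (fun i => i == 0 || i == m'.length || !(m'[i]?.getD 'P' == m'[i - 1]?.getD 'P')) j := by
    intro j hj
    have hj' : j < m'.length + 1 := List.mem_range.mp hj
    cases j with
    | zero =>
      simp only [Function.comp]
      cases m' with
      | nil => simp
      | cons d m'' =>
        have hd : d ≠ c := hne d rfl
        have e1 : (List.replicate k c ++ d :: m'')[k + 0]? = some d := by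
          rw [List.getElem?_append_right (by simp <;> omega)]
          simp
        have e2 : (List.replicate k c ++ d :: m'')[k + 0 - 1]? = some c := by
          rw [List.getElem?_append_left (by simp <;> omega), List.getElem?_replicate]
          simp <;> omega
        simp only [e1, e2, Option.getD_some]
        simp [hd] <;> omega
    | succ j' =>
      simp only [Function.comp]
      have e1 : (List.replicate k c ++ m')[k + (j' + 1)]? = m'[j' + 1]? := by
        rw [List.getElem?_append_right (by simp <;> omega)]
        congr 1; simp
      have e2 : (List.replicate k c ++ m')[k + (j' + 1) - 1]? = m'[j' + 1 - 1]? := by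
        rw [List.getElem?_append_right (by simp <;> omega)]
        congr 1; simp <;> omega
      have e3 : ((k + (j' + 1) == 0) : Bool) = false := by
        simp
      have e4 : ((k + (j' + 1) == k + m'.length) : Bool) = ((j' + 1 == m'.length) : Bool) := by
        cases h : (j' + 1 == m'.length) <;> simp_all <;> omega
      have e5 : ((j' + 1 == 0) : Bool) = false := by simp
      simp only [e1, e2, e3, e4, e5, Bool.false_or]
  rw [List.filter_congr h2]
  rfl

theorem pvCuts_eq_zero_cons (m : List Char) : pvCuts m = 0 :: (pvCuts m).tail := by
  unfold pvCuts
  rw [List.range_succ_eq_map, List.filter_cons]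
  simp

theorem dropWhile_head_false (p : Char → Bool) : ∀ (l : List Char) (x : Char) (xs : List Char),
    l.dropWhile p = x :: xs → p x = false := by
  intro l
  induction l with
  | nil => intro x xs h; simp [List.dropWhile] at h
  | cons c l ih =>
    intro x xs h
    by_cases hc : p c
    · rw [List.dropWhile_cons_of_pos hc] at h; exact ih x xs h
    · rw [List.dropWhile_cons_of_neg hc] at h
      cases h; simpa using hc

-- B's pieces equal the runs-based pieces
theorem pvB_eq_runs : ∀ (n : Nat) (l : List Char), l.length ≤ n →
    ((pvCuts (pvMask l)).zip (pvCuts (pvMask l)).tail).map (pvPieceB (pvMask l))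
      = (pvRuns l).map pvRunPiece := by
  intro n
  induction n with
  | zero =>
    intro l hl
    have : l = [] := List.eq_nil_of_length_eq_zero (Nat.le_zero.mp hl)
    subst this; decide
  | succ n ih =>
    intro l hl
    cases l with
    | nil => decide
    | cons c rest =>
      set p : Char → Bool := fun x => pvClassify x == pvClassify c with hp
      have hpc : p c = true := by simp [hp]
      have htw : (c :: rest).takeWhile p = c :: rest.takeWhile p := by
        rw [List.takeWhile_cons_of_pos hpc]
      have hdw : (c :: rest).dropWhile p = rest.dropWhile p := by
        rw [List.dropWhile_cons_of_pos hpc]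
      set k : Nat := ((c :: rest).takeWhile p).length with hk
      set d : List Char := (c :: rest).dropWhile p with hd
      have hk1 : 1 ≤ k := by rw [hk, htw]; simp
      -- mask decomposition
      have hmaskt : ((c :: rest).takeWhile p).map pvClassify = List.replicate k (pvClassify c) := by
        rw [List.eq_replicate_iff]
        constructor
        · simp [hk]
        · intro b hb
          obtain ⟨x, hx, rfl⟩ := List.mem_map.mp hb
          have := List.mem_takeWhile_imp hx
          rw [hp] at this
          exact eq_of_beq this
      have hmask : pvMask (c :: rest) = List.replicate k (pvClassify c) ++ pvMask d := by
        unfold pvMask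
        rw [← hmaskt, ← List.map_append, List.takeWhile_append_dropWhile]
      have hne : ∀ e, (pvMask d).head? = some e → e ≠ pvClassify c := by
        intro e he
        cases hdc : d with
        | nil => rw [hdc] at he; simp [pvMask] at he
        | cons x xs =>
          rw [hdc] at he
          simp [pvMask] at he
          have hx : p x = false := dropWhile_head_false p (c :: rest) x xs (by rw [← hd, hdc])
          rw [hp] at hx
          rw [← he]
          simpa using hx
      -- runs decomposition
      have hruns : pvRuns (c :: rest) = (pvClassify c, k) :: pvRuns d := by
        rw [pvRuns_cons]
        congr 2
        · rw [hk, htw]; simp [hp]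
        · rw [hdw, hp]
      have hdlen : d.length ≤ n := by
        rw [hdw]
        have := List.length_dropWhile_le p rest
        simp at hl; omega
      -- cut decomposition
      have hcuts : pvCuts (pvMask (c :: rest)) = 0 :: (pvCuts (pvMask d)).map (k + ·) := by
        rw [hmask]; exact pvCuts_decomp k (pvClassify c) (pvMask d) hk1 hne
      rw [hcuts]
      rw [pvCuts_eq_zero_cons (pvMask d)]
      set T : List Nat := (pvCuts (pvMask d)).tail with hT
      rw [hruns, List.tail_cons]
      -- head piece
      have hhead : pvPieceB (pvMask (c :: rest)) (0, k + 0) = pvRunPiece (pvClassify c, k) := by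
        have e0 : (pvMask (c :: rest))[0]?.getD 'P' = pvClassify c := by
          rw [hmask, List.getElem?_append_left (by simp <;> omega), List.getElem?_replicate,
            if_pos (by omega)]
          rfl
        simp [pvPieceB, pvRunPiece, e0]
      have hshift : ∀ z : Nat × Nat,
          pvPieceB (pvMask (c :: rest)) (k + z.1, k + z.2) = pvPieceB (pvMask d) z := by
        intro ⟨a, b⟩
        have ea : (pvMask (c :: rest))[k + a]?.getD 'P' = (pvMask d)[a]?.getD 'P' := by
          rw [hmask, List.getElem?_append_right (by simp <;> omega)]
          congr 2; simp
        have eb : (k + b) - (k + a) = b - a := by omega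
        simp [pvPieceB, ea, eb]
      have hz : ((0 :: (0 :: T).map (k + ·)).zip ((0 :: T).map (k + ·)))
          = (0, k + 0) :: ((0 :: T).zip T).map (Prod.map (k + ·) (k + ·)) := by
        rw [List.map_cons, List.zip_cons_cons, ← List.map_cons, List.zip_map]
      rw [hz, List.map_cons, List.map_cons, List.map_map, hhead]
      congr 1
      · have hmc : ∀ z ∈ (0 :: T).zip T,
            (pvPieceB (pvMask (c :: rest)) ∘ Prod.map (k + ·) (k + ·)) z = pvPieceB (pvMask d) z := by
          intro z _
          obtain ⟨a, b⟩ := z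
          simpa using hshift (a, b)
        rw [List.map_congr_left hmc]
        have hih := ih d hdlen
        rw [pvCuts_eq_zero_cons (pvMask d)] at hih
        rw [← hT] at hih
        simp only [List.tail_cons] at hih
        exact hih

-- ===== VERDICT =====
theorem extract_shape_py_spec : Claim_equal_extract_shape_py := by
  intro value _
  unfold Spec_extract_shape_py
  simp only [extract_shape_py, extract_shape_py_alt]
  rw [join_nil_eq_flatten, join_nil_eq_flatten,
    pvMain value.toList.length value.toList le_rfl,
    pvB_eq_runs value.toList.length value.toList le_rfl]
  rfl
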